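-- pv_equiv track=rewrite | github.com/adzai/adventofcode | 2021/4.py | get_list_of_boards
-- ===== SOURCE A (Python) =====
-- def get_list_of_boards(board_input):
--     list_of_boards = []
--     d = dict()
--     y = 0
--     for row in board_input:
--         if row == "\n":
--             list_of_boards.append(d)
--             d = dict()
--             y = 0
--         else:
--             for x, elem in enumerate(row.split()):
--                 d[elem] = (x, y)
--             y += 1
--
--     return list_of_boards
-- ===== SOURCE B (Python) =====
-- def get_list_of_boards(board_input):
--     # Repeatedly cut the input at the first remaining "\n" separator: each cut
--     # yields one complete board (the rows before the separator), whose dict is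
--     # built from a flat pair generator; rows after the last separator are never
--     # reached, so the trailing unterminated board is dropped.
--     boards = []
--     rest = board_input
--     while "\n" in rest:
--         i = rest.index("\n")
--         boards.append(dict((elem, (x, y))
--                            for y, row in enumerate(rest[:i])
--                            for x, elem in enumerate(row.split())))
--         rest = rest[i + 1:]
--     return boards
-- ===== Notes on version B (the rewrite author's own statement) =====
-- stated objective: alternative
-- what changed: Replaces A's single pass that interleaves boundary detection with per-element dict mutation (running dict + y counter) by a cut-at-separator loop: repeatedly find the first remaining '\n' with list.index, slice off the complete board before it, build that board's dict in one shot with the dict() constructor over a flat pair generator, and continue on the remainder.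
import Mathlib
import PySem

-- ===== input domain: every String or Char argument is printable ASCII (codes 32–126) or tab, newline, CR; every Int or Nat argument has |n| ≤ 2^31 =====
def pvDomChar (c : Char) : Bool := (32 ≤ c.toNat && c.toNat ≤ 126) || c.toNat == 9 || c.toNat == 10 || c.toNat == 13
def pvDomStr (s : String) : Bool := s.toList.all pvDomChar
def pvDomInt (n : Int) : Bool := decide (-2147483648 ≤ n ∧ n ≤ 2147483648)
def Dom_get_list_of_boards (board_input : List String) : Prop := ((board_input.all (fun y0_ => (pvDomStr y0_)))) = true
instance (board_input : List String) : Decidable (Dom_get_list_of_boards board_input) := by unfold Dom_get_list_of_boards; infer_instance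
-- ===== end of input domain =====

-- B replaces A's single interleaved pass (running dict + y counter) with a cut-at-separator
-- loop: find the first remaining "\n", build that board's dict in one shot from the slice
-- before it, continue on the remainder (different decomposition; a timing run measured B faster by a constant factor).

-- ===== PORT A =====
-- state: (list_of_boards, d, y); dicts are returned as their items lists
def pvStepA (st : List (PySem.Dict String (Int × Int)) × PySem.Dict String (Int × Int) × Int)
    (row : String) : List (PySem.Dict String (Int × Int)) × PySem.Dict String (Int × Int) × Int :=
  if row = "\n" then (st.1 ++ [st.2.1], PySem.Dict.empty, 0)
  else (st.1,
        (PySem.List.enumerate (PySem.Str.split₀ row)).foldl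
          (fun d p => d.insert p.2 (p.1, st.2.2)) st.2.1,
        st.2.2 + 1)

def get_list_of_boards (board_input : List String) : List (List (String × Int × Int)) :=
  (board_input.foldl pvStepA ([], PySem.Dict.empty, 0)).1.map (·.items)

-- ===== PORT B =====
-- dict((elem,(x,y)) for y,row in enumerate(rows) for x,elem in enumerate(row.split()))
def pvBoard (rows : List String) : PySem.Dict String (Int × Int) :=
  (PySem.List.enumerate rows).foldl
    (fun d q =>
      (PySem.List.enumerate (PySem.Str.split₀ q.2)).foldl
        (fun d p => d.insert p.2 (p.1, q.1)) d)
    PySem.Dict.empty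

-- the while loop: 'while "\n" in rest: i = rest.index("\n"); append board(rest[:i]); rest = rest[i+1:]'
-- ("\n" in rest, then rest.index("\n"), is exactly: index? rest "\n" = some i)
def pvCutLoop (boards : List (List (String × Int × Int))) (rest : List String) :
    List (List (String × Int × Int)) :=
  match h : PySem.List.index? rest "\n" with
  | none => boards
  | some i =>
      pvCutLoop (boards ++ [(pvBoard (rest.take i)).items]) (rest.drop (i + 1))
termination_by rest.length
decreasing_by
  have := PySem.List.getElem_of_index?_eq_some h
  obtain ⟨hk, -, -⟩ := this
  simp
  omega

def get_list_of_boards_alt (board_input : List String) : List (List (String × Int × Int)) :=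
  pvCutLoop [] board_input

-- ===== PRECONDITION & SPEC =====
def Spec_get_list_of_boards (board_input : List String) (out : List (List (String × Int × Int))) : Prop := out = get_list_of_boards_alt board_input
instance (board_input : List String) (out : List (List (String × Int × Int))) : Decidable (Spec_get_list_of_boards board_input out) := by unfold Spec_get_list_of_boards; infer_instance

-- ===== CLAIM (what is proved, stated in full; the proofs are below) =====
def Claim_equal_get_list_of_boards : Prop := ∀ (board_input : List String), Dom_get_list_of_boards board_input → Spec_get_list_of_boards board_input (get_list_of_boards board_input)

-- ===== LEMMAS AND PROOFS =====

-- appending one row to a group extends its board dict with that row at y = group length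
theorem pvBoard_append (rows : List String) (r : String) :
    pvBoard (rows ++ [r]) =
      (PySem.List.enumerate (PySem.Str.split₀ r)).foldl
        (fun d p => d.insert p.2 (p.1, (rows.length : Int))) (pvBoard rows) := by
  simp [pvBoard, PySem.List.enumerate_append, PySem.List.enumerate_cons,
        PySem.List.enumerate_nil, List.foldl_append]

-- unfolding equations for the cut loop
theorem pvCutLoop_none (boards : List (List (String × Int × Int))) (rest : List String)
    (h : PySem.List.index? rest "\n" = none) : pvCutLoop boards rest = boards := by
  rw [pvCutLoop]
  split
  · rfl
  · rename_i i heq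
    rw [PySem.List.index?_eq_idxOf?] at h
    simp [h] at heq

theorem pvCutLoop_some (boards : List (List (String × Int × Int))) (rest : List String)
    (i : ℕ) (h : PySem.List.index? rest "\n" = some i) :
    pvCutLoop boards rest =
      pvCutLoop (boards ++ [(pvBoard (rest.take i)).items]) (rest.drop (i + 1)) := by
  rw [pvCutLoop]
  split
  · rename_i heq
    rw [PySem.List.index?_eq_idxOf?] at h
    simp [h] at heq
  · rename_i j heq
    rw [PySem.List.index?_eq_idxOf?] at heq
    rw [PySem.List.index?_eq_idxOf?] at h
    rw [h] at heq
    cases heq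
    rfl

-- A's fold over separator-free rows only grows the current dict
theorem pv_noSep (rows : List String) :
    ∀ (L : List (PySem.Dict String (Int × Int))) (cur : List String), "\n" ∉ rows →
      rows.foldl pvStepA (L, pvBoard cur, (cur.length : Int)) =
        (L, pvBoard (cur ++ rows), ((cur ++ rows).length : Int)) := by
  induction rows with
  | nil => intro L cur _; simp
  | cons r rest ih =>
    intro L cur h
    have hr : r ≠ "\n" := fun he => h (he ▸ List.mem_cons_self)
    have hA : pvStepA (L, pvBoard cur, (cur.length : Int)) r =
        (L, pvBoard (cur ++ [r]), ((cur ++ [r]).length : Int)) := by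
      simp [pvStepA, hr, pvBoard_append]
    have h2 : "\n" ∉ rest := fun he => h (List.mem_cons_of_mem _ he)
    simp only [List.foldl_cons, hA, ih L (cur ++ [r]) h2, List.append_assoc,
      List.singleton_append]

-- main invariant: A's fold from a fresh dict equals the cut loop
theorem pv_main (n : ℕ) (rest : List String) (hn : rest.length ≤ n)
    (L : List (PySem.Dict String (Int × Int))) :
    ((rest.foldl pvStepA (L, PySem.Dict.empty, 0)).1).map (·.items) =
      pvCutLoop (L.map (·.items)) rest := by
  induction n generalizing rest L with
  | zero =>
    have : rest = [] := List.eq_nil_of_length_eq_zero (Nat.le_zero.mp hn)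
    subst this
    simp [pvCutLoop]
  | succ n ih =>
    cases h : PySem.List.index? rest "\n" with
    | none =>
      have hnm : "\n" ∉ rest := (PySem.List.index?_eq_none_iff rest "\n").mp h
      have h0 : (PySem.Dict.empty : PySem.Dict String (Int × Int)) = pvBoard [] := by
        simp [pvBoard, PySem.List.enumerate_nil]
      rw [h0, show ((0 : Int) = (([] : List String).length : Int)) from rfl,
        pv_noSep rest L [] hnm]
      rw [pvCutLoop_none _ _ h]
    | some i =>
      obtain ⟨pre, suf, hsplit, hlen, hpre⟩ := (PySem.List.index?_eq_some_iff rest "\n" i).mp h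
      subst hsplit
      have h0 : (PySem.Dict.empty : PySem.Dict String (Int × Int)) = pvBoard [] := by
        simp [pvBoard, PySem.List.enumerate_nil]
      have hfold : ((pre ++ "\n" :: suf).foldl pvStepA (L, PySem.Dict.empty, 0)) =
          suf.foldl pvStepA (L ++ [pvBoard pre], PySem.Dict.empty, 0) := by
        rw [List.foldl_append]
        rw [h0, show ((0 : Int) = (([] : List String).length : Int)) from rfl,
          pv_noSep pre L [] hpre]
        simp [pvStepA]
        rw [h0]
      rw [hfold]
      have hsuf : suf.length ≤ n := by
        have := hn
        simp at this
        omega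
      rw [ih suf hsuf (L ++ [pvBoard pre])]
      rw [pvCutLoop_some _ _ i h]
      have htake : (pre ++ "\n" :: suf).take i = pre := by
        rw [← hlen, List.take_left]
      have hdrop : (pre ++ "\n" :: suf).drop (i + 1) = suf := by
        rw [← hlen, show pre.length + 1 = pre.length + 1 from rfl, List.drop_append]
        simp
      rw [htake, hdrop]
      simp

-- ===== VERDICT (by name: the statement is the Claim_ definition above) =====
theorem get_list_of_boards_spec : Claim_equal_get_list_of_boards := by
  intro board_input _
  unfold Spec_get_list_of_boards get_list_of_boards get_list_of_boards_alt
  have h := pv_main board_input.length board_input le_rfl []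
  simpa using h
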